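-- pv_equiv track=rewrite | github.com/lin/lin.github.io | public/cp/cf/847/d.py | solve
-- ===== SOURCE A (Python) =====
-- from collections import defaultdict,deque,Counter
--
-- def solve(n, nums):
--     count = Counter(nums)
--     res = 0
--     nums.sort()
--     for num in nums:
--         if count[num] > 0:
--             count[num] -= 1
--             curr = num
--             while count[curr + 1] > 0:
--                 curr += 1
--                 count[curr] -= 1
--             res += 1
--     return res
-- ===== SOURCE B (Python) =====
-- from collections import Counter
--
--
-- def solve(n, nums):
--     nums.sort()  # keep A's observable in-place sort of the argument
--     count = Counter(nums)
--     return sum(max(0, count[v] - count[v - 1]) for v in count)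
-- ===== Notes on version B (the rewrite author's own statement) =====
-- stated objective: simpler
-- what changed: Replaces the greedy chain construction (outer scan with an inner while that walks and decrements consecutive counts) by a closed-form single pass over the distinct values: each value v starts exactly max(0, count[v]-count[v-1]) chains, so their sum is the answer.
import Mathlib
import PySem

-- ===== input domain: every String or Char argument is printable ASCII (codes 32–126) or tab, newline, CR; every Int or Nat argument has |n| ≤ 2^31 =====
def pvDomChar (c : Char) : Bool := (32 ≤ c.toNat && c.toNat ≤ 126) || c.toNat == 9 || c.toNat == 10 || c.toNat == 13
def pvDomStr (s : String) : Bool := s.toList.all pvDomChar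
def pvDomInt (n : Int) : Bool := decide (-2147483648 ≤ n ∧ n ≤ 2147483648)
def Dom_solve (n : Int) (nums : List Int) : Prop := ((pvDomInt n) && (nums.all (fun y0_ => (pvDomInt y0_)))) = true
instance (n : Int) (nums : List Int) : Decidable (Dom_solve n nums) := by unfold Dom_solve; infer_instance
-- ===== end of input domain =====

-- B replaces A's greedy chain building by the closed-form count of chain starts per distinct value; equal return value (and both sort the argument in place in Python).

-- ===== PORT A =====
-- the inner 'while count[curr+1] > 0' loop; fuel = len(nums) always suffices (each
-- iteration consumes one positive unit of the counter, whose total is at most len(nums))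
def solveChain : Nat → PySem.Dict Int Int → Int → PySem.Dict Int Int
  | 0, count, _ => count
  | fuel+1, count, curr =>
    if count.getD (curr+1) 0 > 0 then
      solveChain fuel (count.insert (curr+1) (count.getD (curr+1) 0 - 1)) (curr+1)
    else count

def solve (n : Int) (nums : List Int) : Int :=
  let count := PySem.Dict.counter nums
  let sortedNums := PySem.List.sorted nums (fun x => x) false
  (sortedNums.foldl
    (fun (st : PySem.Dict Int Int × Int) num =>
      if st.1.getD num 0 > 0 then
        (solveChain sortedNums.length (st.1.insert num (st.1.getD num 0 - 1)) num, st.2 + 1)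
      else st)
    (count, 0)).2

-- ===== PORT B =====
def solve_alt (n : Int) (nums : List Int) : Int :=
  let s := PySem.List.sorted nums (fun x => x) false   -- nums.sort()
  let count := PySem.Dict.counter s
  (count.keys.map (fun v => max 0 (count.getD v 0 - count.getD (v-1) 0))).sum

-- ===== PRECONDITION & SPEC =====
def Spec_solve (n : Int) (nums : List Int) (out : Int) : Prop := out = solve_alt n nums
instance (n : Int) (nums : List Int) (out : Int) : Decidable (Spec_solve n nums out) := by unfold Spec_solve; infer_instance

-- ===== CLAIM (what is proved, stated in full; the proofs are below) =====
def Claim_equal_solve : Prop := ∀ (n : Int) (nums : List Int), Dom_solve n nums → Spec_solve n nums (solve n nums)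

-- ===== LEMMAS AND PROOFS =====

-- functional mirror of A's counter state
def decrF (c : Int → Int) (w : Int) : Int → Int := fun v => if v = w then c w - 1 else c v

def chainF : Nat → (Int → Int) → Int → (Int → Int)
  | 0, c, _ => c
  | fuel+1, c, curr => if c (curr+1) > 0 then chainF fuel (decrF c (curr+1)) (curr+1) else c

def loopF (fuel : Nat) : List Int → (Int → Int) → Int → Int
  | [], _, res => res
  | x :: t, c, res =>
    if c x > 0 then loopF fuel t (chainF fuel (decrF c x) x) (res+1) else loopF fuel t c res

-- per-value term and its sum / counter mass over a finite set of values
def tD (c : Int → Int) (v : Int) : Int := max 0 (c v - c (v-1))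
def FD (D : Finset Int) (c : Int → Int) : Int := ∑ v ∈ D, tD c v
def MD (D : Finset Int) (c : Int → Int) : Nat := ∑ v ∈ D, (c v).toNat

theorem bridge_chain (fuel : Nat) (d : PySem.Dict Int Int) (c : Int → Int) (curr : Int)
    (h : ∀ v, d.getD v 0 = c v) :
    ∀ v, (solveChain fuel d curr).getD v 0 = chainF fuel c curr v := by
  induction fuel generalizing d c curr with
  | zero => simpa [solveChain, chainF] using h
  | succ fuel ih =>
    intro v
    simp only [solveChain, chainF, h]
    by_cases hc : c (curr+1) > 0
    · simp only [hc, if_pos]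
      exact ih _ _ _ (fun w => by
        rw [PySem.Dict.getD_insert, h]
        simp [decrF]) v
    · simp [hc, h]

theorem bridge_loop (l : List Int) (fuel : Nat) (d : PySem.Dict Int Int) (c : Int → Int) (res : Int)
    (h : ∀ v, d.getD v 0 = c v) :
    (l.foldl
      (fun (st : PySem.Dict Int Int × Int) num =>
        if st.1.getD num 0 > 0 then
          (solveChain fuel (st.1.insert num (st.1.getD num 0 - 1)) num, st.2 + 1)
        else st) (d, res)).2 = loopF fuel l c res := by
  induction l generalizing d c res with
  | nil => simp [loopF]
  | cons x t ih =>
    simp only [List.foldl_cons, loopF, h]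
    by_cases hx : c x > 0
    · simp only [hx, if_pos]
      exact ih _ _ _ (bridge_chain fuel _ (decrF c x) x (fun w => by
        rw [PySem.Dict.getD_insert, h]
        simp [decrF]))
    · simp [hx, ih _ _ _ h]

theorem decr_F (D : Finset Int) (c : Int → Int) (w : Int)
    (hnn : ∀ v, 0 ≤ c v) (hsupp : ∀ v, 0 < c v → v ∈ D) (hw : 0 < c w) :
    FD D (decrF c w) = FD D c - (if c (w-1) < c w then 1 else 0) + (if c w ≤ c (w+1) then 1 else 0) := by
  have hwD : w ∈ D := hsupp w hw
  have hself : decrF c w w = c w - 1 := by simp [decrF]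
  have hother : ∀ v, v ≠ w → decrF c w v = c v := by intro v hv; simp [decrF, hv]
  have e1 : w - 1 ≠ w := by omega
  have e2 : w + 1 - 1 = w := by ring
  have t1 : tD (decrF c w) w = max 0 (c w - 1 - c (w-1)) := by
    rw [tD, hself, hother _ e1]
  by_cases hw1 : w + 1 ∈ D
  · have hw1' : w + 1 ∈ D.erase w := Finset.mem_erase.mpr ⟨by omega, hw1⟩
    have t2 : tD (decrF c w) (w+1) = max 0 (c (w+1) - (c w - 1)) := by
      rw [tD, hother _ (by omega), e2, hself]
    have hres : ∑ v ∈ (D.erase w).erase (w+1), tD (decrF c w) v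
        = ∑ v ∈ (D.erase w).erase (w+1), tD c v := by
      apply Finset.sum_congr rfl
      intro v hv
      rcases Finset.mem_erase.mp hv with ⟨hv1, hv2⟩
      rcases Finset.mem_erase.mp hv2 with ⟨hv3, _⟩
      rw [tD, tD, hother _ hv3, hother _ (by omega)]
    unfold FD
    rw [← Finset.sum_erase_add _ _ hwD, ← Finset.sum_erase_add _ _ hwD,
        ← Finset.sum_erase_add _ _ hw1', ← Finset.sum_erase_add _ _ hw1',
        hres, t1, t2, tD, tD, e2]
    split_ifs <;> omega
  · have hz : c (w+1) = 0 := le_antisymm (by by_contra h; exact hw1 (hsupp _ (by omega))) (hnn _)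
    have hres : ∑ v ∈ D.erase w, tD (decrF c w) v = ∑ v ∈ D.erase w, tD c v := by
      apply Finset.sum_congr rfl
      intro v hv
      rcases Finset.mem_erase.mp hv with ⟨hv1, hv2⟩
      have hv3 : v ≠ w + 1 := by rintro rfl; exact hw1 hv2
      rw [tD, tD, hother _ hv1, hother _ (by omega)]
    unfold FD
    rw [← Finset.sum_erase_add _ _ hwD, ← Finset.sum_erase_add _ _ hwD, hres, t1, tD]
    split_ifs <;> omega

theorem MD_decr (D : Finset Int) (c : Int → Int) (w : Int) (hmem : w ∈ D) (hw : 0 < c w) :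
    MD D (decrF c w) + 1 = MD D c := by
  unfold MD
  rw [← Finset.sum_erase_add _ _ hmem, ← Finset.sum_erase_add _ _ hmem]
  have hres : ∑ v ∈ D.erase w, (decrF c w v).toNat = ∑ v ∈ D.erase w, (c v).toNat := by
    apply Finset.sum_congr rfl
    intro v hv
    rw [show decrF c w v = c v by simp [decrF, Finset.ne_of_mem_erase hv]]
  rw [hres, show decrF c w w = c w - 1 by simp [decrF]]
  omega

theorem chain_nonneg (fuel : Nat) (c : Int → Int) (curr : Int) (hnn : ∀ v, 0 ≤ c v) :
    ∀ v, 0 ≤ chainF fuel c curr v := by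
  induction fuel generalizing c curr with
  | zero => simpa [chainF] using hnn
  | succ fuel ih =>
    intro v
    simp only [chainF]
    by_cases hc : c (curr+1) > 0
    · simp only [hc, if_pos]
      exact ih _ _ (fun w => by simp only [decrF]; split <;> [omega; exact hnn w]) v
    · simp [hc, hnn v]

theorem chain_le (fuel : Nat) (c : Int → Int) (curr : Int) :
    ∀ v, chainF fuel c curr v ≤ c v := by
  induction fuel generalizing c curr with
  | zero => simp [chainF]
  | succ fuel ih =>
    intro v
    simp only [chainF]
    by_cases hc : c (curr+1) > 0
    · simp only [hc, if_pos]
      refine le_trans (ih (decrF c (curr+1)) (curr+1) v) ?_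
      simp only [decrF]
      split
      · next hv => subst hv; omega
      · exact le_rfl
    · simp [hc]

theorem chain_sum (D : Finset Int) (fuel : Nat) (c : Int → Int) (curr : Int)
    (hnn : ∀ v, 0 ≤ c v) (hsupp : ∀ v, 0 < c v → v ∈ D) (hfuel : MD D c ≤ fuel) :
    FD D (chainF fuel c curr) = FD D c - (if c curr < c (curr+1) then 1 else 0) := by
  induction fuel generalizing c curr with
  | zero =>
    have hz : ∀ v, c v = 0 := by
      intro v
      by_cases hv : v ∈ D
      · have h0 : MD D c = 0 := Nat.le_zero.mp hfuel
        have := (Finset.sum_eq_zero_iff.mp h0) v hv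
        have := hnn v; omega
      · have := hnn v
        by_contra h
        exact hv (hsupp v (by omega))
    simp [chainF, hz]
  | succ fuel ih =>
    simp only [chainF]
    by_cases hc : c (curr+1) > 0
    · rw [if_pos hc]
      have hmem : curr + 1 ∈ D := hsupp _ hc
      have hnn' : ∀ v, 0 ≤ decrF c (curr+1) v := by
        intro v; simp only [decrF]; split
        · next hv => omega
        · exact hnn v
      have hsupp' : ∀ v, 0 < decrF c (curr+1) v → v ∈ D := by
        intro v hv
        apply hsupp
        simp only [decrF] at hv; split at hv
        · next hveq => subst hveq; omega
        · exact hv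
      have hfuel' : MD D (decrF c (curr+1)) ≤ fuel := by
        have := MD_decr D c (curr+1) hmem hc; omega
      rw [ih _ _ hnn' hsupp' hfuel', decr_F D c (curr+1) hnn hsupp hc]
      have ea : decrF c (curr+1) (curr+1) = c (curr+1) - 1 := by simp [decrF]
      have eb : decrF c (curr+1) (curr+1+1) = c (curr+1+1) := by
        rw [decrF, if_neg (by omega)]
      have ec : (curr + 1 - 1) = curr := by ring
      rw [ea, eb, ec]
      split_ifs <;> omega
    · have h0 : c (curr+1) = 0 := le_antisymm (by omega) (hnn _)
      rw [if_neg hc, if_neg (by have := hnn curr; omega)]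
      ring

theorem loop_formula (D : Finset Int) (l : List Int) (fuel : Nat) (c : Int → Int) (res : Int)
    (hsort : l.Pairwise (· ≤ ·)) (hnn : ∀ v, 0 ≤ c v)
    (hbd : ∀ v, c v ≤ (l.count v : Int)) (hD : ∀ v ∈ l, v ∈ D) (hfuel : l.length ≤ fuel) :
    loopF fuel l c res = res + FD D c := by
  induction l generalizing c res with
  | nil =>
    have hz : ∀ v, c v = 0 := by
      intro v
      have h1 := hbd v
      rw [List.count_nil] at h1
      have h2 := hnn v
      omega
    have : FD D c = 0 := Finset.sum_eq_zero (by intro v _; simp [tD, hz])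
    simp [loopF, this]
  | cons x t ih =>
    have hxt : ∀ y ∈ t, x ≤ y := (List.pairwise_cons.mp hsort).1
    have hsupp : ∀ v, 0 < c v → v ∈ D := by
      intro v hv
      have hb := hbd v
      have hcnt : 0 < (x :: t).count v := by exact_mod_cast lt_of_lt_of_le hv hb
      exact hD v (List.count_pos_iff.mp hcnt)
    have hsum : (∑ v ∈ D, ((x :: t).count v : ℕ)) = (x :: t).length := by
      have base : ∑ v ∈ (x :: t).toFinset, (x :: t).count v = (x :: t).length := by
        simpa using Multiset.toFinset_sum_count_eq ((x :: t : List Int) : Multiset Int)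
      rw [← base]
      exact (Finset.sum_subset
        (fun v hv => hD v (List.mem_toFinset.mp hv))
        (fun v _ hvnot => List.count_eq_zero.mpr (fun hm => hvnot (List.mem_toFinset.mpr hm)))).symm
    have hMD : MD D c ≤ (x :: t).length := by
      rw [← hsum]
      exact Finset.sum_le_sum (by intro v _; have := hbd v; omega)
    by_cases hx : c x > 0
    · simp only [loopF, if_pos hx]
      have hnn1 : ∀ v, 0 ≤ decrF c x v := by
        intro v; simp only [decrF]; split
        · next hv => omega
        · exact hnn v
      have c2nn : ∀ v, 0 ≤ chainF fuel (decrF c x) x v := chain_nonneg fuel _ x hnn1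
      have c2le : ∀ v, chainF fuel (decrF c x) x v ≤ decrF c x v := chain_le fuel _ x
      have hbd2 : ∀ v, chainF fuel (decrF c x) x v ≤ (t.count v : Int) := by
        intro v
        have h1 := c2le v
        have h2 := hbd v
        by_cases hv : v = x
        · subst hv
          rw [show decrF c v v = c v - 1 by simp [decrF]] at h1
          rw [List.count_cons_self] at h2
          push_cast at h2 ⊢
          omega
        · rw [show decrF c x v = c v by simp [decrF, hv]] at h1
          rw [List.count_cons_of_ne (Ne.symm hv)] at h2
          omega
      have hxD : x ∈ D := hD x List.mem_cons_self
      have hsupp1 : ∀ v, 0 < decrF c x v → v ∈ D := by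
        intro v hv
        apply hsupp
        simp only [decrF] at hv; split at hv
        · next hveq => subst hveq; omega
        · exact hv
      have hMD1 : MD D (decrF c x) ≤ fuel := by
        have := MD_decr D c x hxD hx
        have hlen : (x :: t).length ≤ fuel := hfuel
        omega
      rw [ih _ _ (List.Pairwise.of_cons hsort) c2nn hbd2 (fun v hv => hD v (List.mem_cons_of_mem x hv))
          (by simp at hfuel ⊢; omega)]
      rw [chain_sum D fuel (decrF c x) x hnn1 hsupp1 hMD1]
      rw [decr_F D c x hnn hsupp hx]
      have hx1 : c (x - 1) = 0 := by
        have hmem : x - 1 ∉ (x :: t) := by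
          intro hm
          rcases List.mem_cons.mp hm with h | h
          · omega
          · have := hxt _ h; omega
        have hcz : (x :: t).count (x - 1) = 0 := List.count_eq_zero.mpr hmem
        have hb1 := hbd (x - 1)
        have hb2 := hnn (x - 1)
        rw [hcz] at hb1
        simp at hb1
        omega
      have ea : decrF c x x = c x - 1 := by simp [decrF]
      have eb : decrF c x (x+1) = c (x+1) := by rw [decrF, if_neg (by omega)]
      rw [ea, eb, hx1]
      split_ifs <;> omega
    · simp only [loopF, if_neg hx]
      refine ih _ _ (List.Pairwise.of_cons hsort) hnn ?_ (fun v hv => hD v (List.mem_cons_of_mem x hv))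
        (by simp at hfuel ⊢; omega)
      intro v
      have := hbd v
      by_cases hv : v = x
      · subst hv; have := hnn v; omega
      · rw [List.count_cons_of_ne (Ne.symm hv)] at this; exact this

-- ===== VERDICT (by name: the statement is the Claim_ definition above) =====
theorem solve_spec : Claim_equal_solve := by
  intro n nums _
  unfold Spec_solve
  have hcnt : ∀ v : Int, (PySem.List.sorted nums (fun x => x) false).count v = nums.count v :=
    fun v => (PySem.List.sorted_perm nums (fun x => x) false).count_eq v
  have hA : solve n nums
      = loopF (PySem.List.sorted nums (fun x => x) false).length
          (PySem.List.sorted nums (fun x => x) false) (fun v => (nums.count v : Int)) 0 := by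
    unfold solve
    exact bridge_loop _ _ _ _ _ (fun v => PySem.Dict.getD_counter nums v)
  have hB : solve_alt n nums
      = ((PySem.Set.ofList (PySem.List.sorted nums (fun x => x) false)).map
          (fun v => max 0 ((nums.count v : Int) - (nums.count (v-1) : Int)))).sum := by
    unfold solve_alt
    simp only [PySem.Dict.keys_counter, PySem.Dict.getD_counter, hcnt]
  rw [hA, hB,
    loop_formula ((PySem.Set.ofList (PySem.List.sorted nums (fun x => x) false)).toFinset)
      (PySem.List.sorted nums (fun x => x) false)
      (PySem.List.sorted nums (fun x => x) false).length
      (fun v => (nums.count v : Int)) 0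
      (by simpa using PySem.List.sorted_pairwise nums (fun x => x))
      (fun v => by positivity)
      (fun v => by rw [hcnt v])
      (fun v hv => List.mem_toFinset.mpr ((PySem.Set.mem_ofList _ _).mpr hv))
      le_rfl,
    zero_add]
  unfold FD tD
  rw [List.sum_toFinset _ (PySem.Set.nodup_ofList _)]
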